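-- pv_equiv track=rewrite | github.com/weiya711/sam | sim/test/test.py | gen_comp_arrs
-- ===== SOURCE A (Python) =====
-- def gen_comp_arrs(crd_lists, count=0, max_el=4):
--     assert len(crd_lists) <= max_el, "Invalid: " + str(len(crd_lists)) + " is not <= " + str(max_el)
--
--     if len(crd_lists) == 0:
--         return [], []
--     if len(crd_lists) == 1:
--         return crd_lists[0], [count, count + len(crd_lists[0])]
--     rest = gen_comp_arrs(crd_lists[1:], count=count+len(crd_lists[0]), max_el=max_el)
--     return crd_lists[0] + rest[0], [count] + rest[1]
-- ===== SOURCE B (Python) =====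
-- def gen_comp_arrs(crd_lists, count=0, max_el=4):
--     assert len(crd_lists) <= max_el, "Invalid: " + str(len(crd_lists)) + " is not <= " + str(max_el)
--     if len(crd_lists) == 0:
--         return [], []
--     data = []
--     running = count
--     offsets = [count]
--     for lst in crd_lists:
--         data = data + lst
--         running += len(lst)
--         offsets.append(running)
--     return data, offsets
-- ===== Notes on version B (the rewrite author's own statement) =====
-- stated objective: simpler
-- what changed: Replaced the recursion (with slicing and list re-prepending at every level) by a single forward loop keeping concatenated data, a running counter and the offset list.
import Mathlib
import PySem

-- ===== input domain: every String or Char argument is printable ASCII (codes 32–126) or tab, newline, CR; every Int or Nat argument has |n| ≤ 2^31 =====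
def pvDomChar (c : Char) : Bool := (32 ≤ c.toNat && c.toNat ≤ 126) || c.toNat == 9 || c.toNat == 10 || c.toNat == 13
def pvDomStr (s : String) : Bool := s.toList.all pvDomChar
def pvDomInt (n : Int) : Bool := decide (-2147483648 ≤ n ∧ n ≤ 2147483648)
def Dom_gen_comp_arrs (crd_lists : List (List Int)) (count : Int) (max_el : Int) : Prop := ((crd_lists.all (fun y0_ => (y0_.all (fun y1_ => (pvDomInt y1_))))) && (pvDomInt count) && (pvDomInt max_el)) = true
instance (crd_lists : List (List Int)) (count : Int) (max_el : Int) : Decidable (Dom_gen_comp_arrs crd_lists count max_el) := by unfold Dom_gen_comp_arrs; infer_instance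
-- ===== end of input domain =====

-- B replaces A's recursion (slicing + re-prepending) by one forward loop with a running counter; objective: simpler.


-- ===== PORT A =====
def gen_comp_arrs (crd_lists : List (List Int)) (count : Int) (max_el : Int) : List Int × List Int :=
  match crd_lists with
  | [] => ([], [])
  | [l] => (l, [count, count + (l.length : Int)])
  | l :: rest =>
    let r := gen_comp_arrs rest (count + (l.length : Int)) max_el
    (l ++ r.1, count :: r.2)

-- ===== PORT B =====
-- the for-loop of Source B: state (data, running, offsets)
def gen_comp_arrs_alt_loop (lists : List (List Int)) (data : List Int) (running : Int) (offsets : List Int) : List Int × List Int :=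
  match lists with
  | [] => (data, offsets)
  | lst :: rest =>
    gen_comp_arrs_alt_loop rest (data ++ lst) (running + (lst.length : Int)) (offsets ++ [running + (lst.length : Int)])

def gen_comp_arrs_alt (crd_lists : List (List Int)) (count : Int) (max_el : Int) : List Int × List Int :=
  if crd_lists.length = 0 then ([], [])
  else gen_comp_arrs_alt_loop crd_lists [] count [count]

-- ===== PRECONDITION & SPEC =====
-- A raises AssertionError when len(crd_lists) > max_el; exactly those inputs are excluded.
def Pre_gen_comp_arrs (crd_lists : List (List Int)) (count : Int) (max_el : Int) : Prop :=
  (crd_lists.length : Int) ≤ max_el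
instance (crd_lists : List (List Int)) (count : Int) (max_el : Int) : Decidable (Pre_gen_comp_arrs crd_lists count max_el) := by unfold Pre_gen_comp_arrs; infer_instance
def pvWitness_gen_comp_arrs : List (List Int) × Int × Int := ([[1, 2], [3]], 0, 4)

def Spec_gen_comp_arrs (crd_lists : List (List Int)) (count : Int) (max_el : Int) (out : List Int × List Int) : Prop := out = gen_comp_arrs_alt crd_lists count max_el
instance (crd_lists : List (List Int)) (count : Int) (max_el : Int) (out : List Int × List Int) : Decidable (Spec_gen_comp_arrs crd_lists count max_el out) := by unfold Spec_gen_comp_arrs; infer_instance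

-- ===== CLAIM =====
def Claim_equal_gen_comp_arrs : Prop := ∀ (crd_lists : List (List Int)) (count : Int) (max_el : Int), Dom_gen_comp_arrs crd_lists count max_el → Pre_gen_comp_arrs crd_lists count max_el → Spec_gen_comp_arrs crd_lists count max_el (gen_comp_arrs crd_lists count max_el)

-- ===== LEMMAS AND PROOFS =====
-- A's offset list starts with the running count, for nonempty input.
theorem genA_snd_head (l : List Int) (rest : List (List Int)) (c m : Int) :
    (gen_comp_arrs (l :: rest) c m).2 = c :: (gen_comp_arrs (l :: rest) c m).2.tail := by
  cases rest <;> simp [gen_comp_arrs]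

-- loop invariant: the loop extends (data, offsets) by A's result (offsets minus its leading count)
theorem loop_eq_genA (lists : List (List Int)) (data : List Int) (running m : Int) (offs : List Int)
    (h : lists ≠ []) :
    gen_comp_arrs_alt_loop lists data running offs =
      (data ++ (gen_comp_arrs lists running m).1, offs ++ (gen_comp_arrs lists running m).2.tail) := by
  induction lists generalizing data running offs with
  | nil => exact absurd rfl h
  | cons l rest ih =>
    cases rest with
    | nil => simp [gen_comp_arrs_alt_loop, gen_comp_arrs]
    | cons l2 rest2 =>
      rw [gen_comp_arrs_alt_loop, ih _ _ _ (by simp)]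
      rw [show gen_comp_arrs (l :: l2 :: rest2) running m =
        (l ++ (gen_comp_arrs (l2 :: rest2) (running + (l.length : Int)) m).1,
         running :: (gen_comp_arrs (l2 :: rest2) (running + (l.length : Int)) m).2) from rfl]
      rw [genA_snd_head l2 rest2 (running + (l.length : Int)) m]
      simp

-- ===== VERDICT =====
theorem gen_comp_arrs_spec : Claim_equal_gen_comp_arrs := by
  intro crd_lists count max_el _ _
  unfold Spec_gen_comp_arrs gen_comp_arrs_alt
  cases crd_lists with
  | nil => simp [gen_comp_arrs]
  | cons l rest =>
    rw [if_neg (by simp)]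
    rw [loop_eq_genA (l :: rest) [] count max_el [count] (by simp)]
    simp only [List.nil_append]
    exact Prod.ext rfl (genA_snd_head l rest count max_el)
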